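-- pv_equiv track=rewrite | github.com/lucianIrsigler/one_step_frames | util/core/translate_util.py | replaceNominals
-- ===== SOURCE A (Python) =====
-- def get_letter(index):
--     char_code = 97 + index
--
--     # Skip 'i', 'v', and 'w'
--     skipCharacters = ["i","v","w","u","f"]
--
--     skips = {ord(i) for i in skipCharacters}
--
--     while char_code in skips:
--         char_code += 1
--
--     # If passed 'z', wrap to 'A', skipping again if needed
--     if char_code > ord('z'):
--         char_code = 65 + (index - 25)  # Adjust for overflow beyond 'z'
--         while char_code in skips:
--             char_code += 1
--
--     return chr(char_code)
--
-- def generateMapping():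
--     nominalToSymbol = {}
--
--     # w_0 to w_8 → 'a' to 'h', skip 'i' → 'j' instead
--     for i in range(9):
--         nominalToSymbol[f"w_{i}"] = get_letter(i)
--
--     # v_0 to v_8 → continue after 'j', total offset of 9
--     for i in range(9):
--         nominalToSymbol[f"v_{i}"] = get_letter(i + 9)
--
--     # u_0 to u_8 → continue again
--     for i in range(9):
--         nominalToSymbol[f"u_{i}"] = get_letter(i + 18)
--
--     return nominalToSymbol
--
-- def replaceNominals(formula:str,nominalToSymbol:dict=generateMapping(),reverse:bool=False):
--     if not reverse:
--         for k,v in nominalToSymbol.items():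
--             formula = formula.replace(k,v)
--     else:
--         reversedMap = {v:k for k,v in nominalToSymbol.items()}
--
--         for k,v in reversedMap.items():
--             formula = formula.replace(k,v)
--
--     return formula
-- ===== SOURCE B (Python) =====
-- def get_letter(index):
--     char_code = 97 + index
--     skipCharacters = ["i","v","w","u","f"]
--     skips = {ord(i) for i in skipCharacters}
--     while char_code in skips:
--         char_code += 1
--     if char_code > ord('z'):
--         char_code = 65 + (index - 25)
--         while char_code in skips:
--             char_code += 1
--     return chr(char_code)
--
-- def generateMapping():
--     nominalToSymbol = {}
--     for i in range(9):
--         nominalToSymbol[f"w_{i}"] = get_letter(i)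
--     for i in range(9):
--         nominalToSymbol[f"v_{i}"] = get_letter(i + 9)
--     for i in range(9):
--         nominalToSymbol[f"u_{i}"] = get_letter(i + 18)
--     return nominalToSymbol
--
-- def replaceNominals(formula: str, nominalToSymbol: dict = generateMapping(), reverse: bool = False):
--     themap = nominalToSymbol if not reverse else {v: k for k, v in nominalToSymbol.items()}
--     # single left-to-right scan of the formula; an empty key can never consume input, so drop it
--     items = [(k, v) for k, v in themap.items() if k]
--     out = []
--     i = 0
--     n = len(formula)
--     while i < n:
--         for k, v in items:
--             if formula.startswith(k, i):
--                 out.append(v)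
--                 i += len(k)
--                 break
--         else:
--             out.append(formula[i])
--             i += 1
--     return "".join(out)
-- ===== Notes on version B (the rewrite author's own statement) =====
-- stated objective: alternative
-- what changed: B replaces A's sequence of one full-string str.replace pass per mapping entry by a single left-to-right scan of the formula that at each position emits the value of the first matching key; Pre_ restricts the claim to maps where the two substitution orders provably coincide (non-interfering maps such as the intended prefix-free nominal mappings, maps whose keys do not occur in the formula, and one-entry maps).
-- outside the precondition, e.g. on replaceNominals('ab', {'': 'X'}, False): A returns 'XaXbX', B returns 'ab'; on replaceNominals('ab', {'b': 'x', 'ab': 'y'}, False): A returns 'ax', B returns 'y'; on replaceNominals('ab', {'a': 'b', 'b': 'c'}, False): A returns 'cc', B returns 'bc'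
import Mathlib
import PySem

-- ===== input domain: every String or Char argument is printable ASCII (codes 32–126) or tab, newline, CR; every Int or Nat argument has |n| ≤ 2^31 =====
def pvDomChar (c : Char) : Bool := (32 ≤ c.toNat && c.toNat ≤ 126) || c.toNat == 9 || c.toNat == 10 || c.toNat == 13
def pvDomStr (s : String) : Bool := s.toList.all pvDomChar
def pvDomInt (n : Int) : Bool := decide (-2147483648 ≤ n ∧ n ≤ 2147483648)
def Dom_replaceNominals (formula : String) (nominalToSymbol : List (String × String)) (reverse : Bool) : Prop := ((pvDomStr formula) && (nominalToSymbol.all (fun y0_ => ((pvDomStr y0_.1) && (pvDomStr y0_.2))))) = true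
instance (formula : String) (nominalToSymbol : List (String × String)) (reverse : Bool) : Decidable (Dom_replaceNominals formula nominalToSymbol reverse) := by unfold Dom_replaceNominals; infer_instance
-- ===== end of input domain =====

-- B replaces A's one-full-pass-per-map-entry substitution by a single left-to-right scan
-- of the formula (first matching key at each position); equal on Pre_'s non-interfering maps.

-- ===== PORT A =====
def replaceNominals (formula : String) (nominalToSymbol : List (String × String)) (reverse : Bool) : String :=
  if !reverse then
    nominalToSymbol.foldl (fun f p => PySem.Str.replace f p.1 p.2) formula
  else
    -- reversedMap = {v: k for k, v in nominalToSymbol.items()}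
    let reversedMap : PySem.Dict String String :=
      nominalToSymbol.foldl (fun d p => d.insert p.2 p.1) PySem.Dict.empty
    reversedMap.items.foldl (fun f p => PySem.Str.replace f p.1 p.2) formula

-- ===== PORT B =====
-- the while/for scan of Source B, on code points: at each position emit the value of the
-- first pair whose key starts there (consuming it), else copy one character.
-- fuel = remaining length; exact since every kept key is nonempty (empty keys are filtered).
def scanB (ps : List (List Char × List Char)) : Nat → List Char → List Char
  | 0, _ => []
  | _ + 1, [] => []
  | f + 1, c :: t =>
    match ps.find? (fun p => p.1.isPrefixOf (c :: t)) with
    | some p => p.2 ++ scanB ps f (List.drop p.1.length (c :: t))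
    | none => c :: scanB ps f t

def replaceNominals_alt (formula : String) (nominalToSymbol : List (String × String)) (reverse : Bool) : String :=
  -- themap = nominalToSymbol if not reverse else {v: k for k, v in nominalToSymbol.items()}
  let themap : List (String × String) :=
    if !reverse then nominalToSymbol
    else (nominalToSymbol.foldl (fun d p => d.insert p.2 p.1)
            (PySem.Dict.empty (κ := String) (ν := String))).items
  -- items = [(k, v) for k, v in themap.items() if k]
  let items := themap.filter (fun p => !p.1.toList.isEmpty)
  let ps := items.map (fun p => (p.1.toList, p.2.toList))
  String.ofList (scanB ps formula.toList.length formula.toList)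

-- ===== PRECONDITION & SPEC =====
-- the active association list (= the dict the Python loops over)
def pvActiveItems (nominalToSymbol : List (String × String)) (reverse : Bool) : List (String × String) :=
  if !reverse then nominalToSymbol
  else (nominalToSymbol.foldl (fun d p => d.insert p.2 p.1)
          (PySem.Dict.empty (κ := String) (ν := String))).items

-- no occurrence of k' can begin inside (a nonempty suffix of) k, whatever text follows k
abbrev pvNoStart (k k' : List Char) : Prop :=
  ((List.range k.length).all
    (fun off => !(k'.isPrefixOf (k.drop off)) && !((k.drop off).isPrefixOf k'))) = true

-- the active items without the pairs ("", ""), which are no-op passes for A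
-- (replacing "" by "" changes nothing) and are dropped by B's key filter
def pvEffItems (nominalToSymbol : List (String × String)) (reverse : Bool) : List (String × String) :=
  (pvActiveItems nominalToSymbol reverse).filter (fun p => !(p.1 == "" && p.2 == ""))

-- the active map does not interfere with itself: nonempty keys, no key able to start
-- inside another key, and no key able to start inside a value or align with its boundary
abbrev pvNonInterfering (items : List (String × String)) : Prop :=
  (∀ p ∈ items, p.1 ≠ "") ∧
  (∀ p ∈ items, ∀ q ∈ items,
      pvNoStart p.1.toList q.2.toList ∧ pvNoStart p.2.toList q.1.toList) ∧
  items.Pairwise (fun p q => pvNoStart p.1.toList q.1.toList ∧ pvNoStart q.1.toList p.1.toList)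

-- Pre_ excludes maps that interfere with themselves (an empty key, keys that can start
-- inside another key or inside/at the boundary of a substituted value) when some
-- effective key also occurs in the formula and the map has more than one effective
-- entry: there sequential full-string passes and a single scan are two different,
-- equally defensible substitution orders (the nominal maps this function is written
-- for are prefix-free and never interfere); it admits every non-interfering map,
-- every map whose effective keys miss the formula, and every one-entry map.
def Pre_replaceNominals (formula : String) (nominalToSymbol : List (String × String)) (reverse : Bool) : Prop :=
  pvNonInterfering (pvEffItems nominalToSymbol reverse) ∨
  (∀ p ∈ pvEffItems nominalToSymbol reverse,
      PySem.Chars.isIn p.1.toList formula.toList = false) ∨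
  ((pvEffItems nominalToSymbol reverse).length = 1 ∧
      ∀ p ∈ pvEffItems nominalToSymbol reverse, p.1 ≠ "")
instance (formula : String) (nominalToSymbol : List (String × String)) (reverse : Bool) : Decidable (Pre_replaceNominals formula nominalToSymbol reverse) := by unfold Pre_replaceNominals; infer_instance

def pvWitness_replaceNominals : String × (List (String × String)) × Bool :=
  ("w_0 & v_0", [("w_0", "a"), ("v_0", "j")], false)

def Spec_replaceNominals (formula : String) (nominalToSymbol : List (String × String)) (reverse : Bool) (out : String) : Prop := out = replaceNominals_alt formula nominalToSymbol reverse
instance (formula : String) (nominalToSymbol : List (String × String)) (reverse : Bool) (out : String) : Decidable (Spec_replaceNominals formula nominalToSymbol reverse out) := by unfold Spec_replaceNominals; infer_instance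

-- ===== CLAIM (what is proved, stated in full; the proofs are below) =====
def Claim_equal_replaceNominals : Prop := ∀ (formula : String) (nominalToSymbol : List (String × String)) (reverse : Bool), Dom_replaceNominals formula nominalToSymbol reverse → Pre_replaceNominals formula nominalToSymbol reverse → Spec_replaceNominals formula nominalToSymbol reverse (replaceNominals formula nominalToSymbol reverse)

-- ===== LEMMAS AND PROOFS =====

-- Functional skeleton of PySem.Chars.replace.go (without the accumulator).
def repF (old new : List Char) : Nat → List Char → List Char
  | 0, l => l
  | _ + 1, [] => []
  | f + 1, c :: t =>
    if old.isPrefixOf (c :: t) then new ++ repF old new f (List.drop old.length (c :: t))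
    else c :: repF old new f t

theorem replace_go_eq (old new : List Char) :
    ∀ (fuel : Nat) (l acc : List Char),
      PySem.Chars.replace.go old new fuel l acc = acc.reverse ++ repF old new fuel l := by
  intro fuel
  induction fuel with
  | zero => intro l acc; cases l <;> simp [PySem.Chars.replace.go, repF]
  | succ f ih =>
    intro l acc
    cases l with
    | nil => simp [PySem.Chars.replace.go, repF]
    | cons c t =>
      simp only [PySem.Chars.replace.go, repF]
      split
      · rw [ih]; simp
      · rw [ih]; simp

theorem repF_stable (old new : List Char) (hold : old ≠ []) :
    ∀ (f g : Nat) (l : List Char), l.length ≤ f → l.length ≤ g →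
      repF old new f l = repF old new g l := by
  intro f
  induction f with
  | zero =>
    intro g l hf _
    have : l = [] := List.eq_nil_of_length_eq_zero (Nat.le_zero.mp hf)
    subst this
    cases g <;> simp [repF]
  | succ f ih =>
    intro g l hf hg
    cases l with
    | nil => cases g <;> simp [repF]
    | cons c t =>
      cases g with
      | zero => simp at hg
      | succ g' =>
        simp only [repF]
        split
        · rename_i hpre
          have hlen : old.length ≤ (c :: t).length :=
            (List.isPrefixOf_iff_prefix.mp hpre).length_le
          have hpos : 0 < old.length := List.length_pos_iff.mpr hold
          have hdrop : (List.drop old.length (c :: t)).length ≤ f := by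
            simp only [List.length_drop, List.length_cons]
            simp only [List.length_cons] at hf
            omega
          have hdrop' : (List.drop old.length (c :: t)).length ≤ g' := by
            simp only [List.length_drop, List.length_cons]
            simp only [List.length_cons] at hg
            omega
          rw [ih g' _ hdrop hdrop']
        · have ht : t.length ≤ f := by simp only [List.length_cons] at hf; omega
          have ht' : t.length ≤ g' := by simp only [List.length_cons] at hg; omega
          rw [ih g' t ht ht']

-- one replace pass, with its canonical fuel
def repc (k v s : List Char) : List Char := repF k v (s.length + 1) s

theorem replace_eq_repc (s k v : List Char) (hk : k ≠ []) :
    PySem.Chars.replace s k v = repc k v s := by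
  have hke : k.isEmpty = false := by
    cases k with
    | nil => exact absurd rfl hk
    | cons a t => rfl
  rw [PySem.Chars.replace, hke]
  simp only [Bool.false_eq_true, if_false]
  rw [replace_go_eq]
  simp only [List.reverse_nil, List.nil_append]
  exact repF_stable k v hk s.length (s.length + 1) s (le_refl _) (Nat.le_succ _)

theorem repc_nil (k v : List Char) : repc k v [] = [] := rfl

theorem repc_cons_not (k v : List Char) (c : Char) (t : List Char)
    (h : k.isPrefixOf (c :: t) = false) : repc k v (c :: t) = c :: repc k v t := by
  show repF k v ((c :: t).length + 1) (c :: t) = c :: repF k v (t.length + 1) t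
  simp only [List.length_cons, repF, h, Bool.false_eq_true, if_false]

theorem repc_front (k v s : List Char) (hk : k ≠ []) (h : k.isPrefixOf s = true) :
    repc k v s = v ++ repc k v (s.drop k.length) := by
  cases s with
  | nil =>
    have : k = [] := by simpa [List.isPrefixOf_iff_prefix] using h
    exact absurd this hk
  | cons c t =>
    show repF k v ((c :: t).length + 1) (c :: t) = _
    simp only [List.length_cons, repF, h, if_true]
    congr 1
    apply repF_stable k v hk
    · have hlen : k.length ≤ (c :: t).length := (List.isPrefixOf_iff_prefix.mp h).length_le
      have hpos : 0 < k.length := List.length_pos_iff.mpr hk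
      simp only [List.length_drop, List.length_cons] at *
      omega
    · exact Nat.le_succ _

-- multi-pass replacement: A's loop over the map
def foldRep (ps : List (List Char × List Char)) (s : List Char) : List Char :=
  ps.foldl (fun s p => repc p.1 p.2 s) s

theorem foldRep_nil_pairs (s : List Char) : foldRep [] s = s := rfl

theorem foldRep_cons (p : List Char × List Char) (L : List (List Char × List Char))
    (s : List Char) : foldRep (p :: L) s = foldRep L (repc p.1 p.2 s) := rfl

theorem foldRep_concat (L : List (List Char × List Char)) (p : List Char × List Char)
    (s : List Char) : foldRep (L ++ [p]) s = repc p.1 p.2 (foldRep L s) := by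
  simp [foldRep, List.foldl_append]

theorem foldRep_nils (L : List (List Char × List Char)) : foldRep L [] = [] := by
  induction L with
  | nil => rfl
  | cons p L ih => rw [foldRep_cons, repc_nil]; exact ih

-- a key char of ps
def pvKC (ps : List (List Char × List Char)) (c : Char) : Prop := ∃ p ∈ ps, c ∈ p.1

-- block lemma: a pass cannot touch a prefix block no occurrence starts in
theorem repc_block (k v : List Char) :
    ∀ (a w : List Char), (∀ off < a.length, k.isPrefixOf (a.drop off ++ w) = false) →
      repc k v (a ++ w) = a ++ repc k v w := by
  intro a
  induction a with
  | nil => intro w _; simp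
  | cons c a' ih =>
    intro w h
    have h0 : k.isPrefixOf (c :: (a' ++ w)) = false := by simpa using h 0 (by simp)
    show repc k v (c :: (a' ++ w)) = c :: (a' ++ repc k v w)
    rw [repc_cons_not k v _ _ h0,
        ih w (fun off hoff => by simpa using h (off + 1) (by simpa using Nat.succ_lt_succ hoff))]

-- unpacked Prop form of pvNoStart, closed under dropping
def pvNS (k v : List Char) : Prop :=
  ∀ off < k.length, v.isPrefixOf (k.drop off) = false ∧ (k.drop off).isPrefixOf v = false

theorem pvNoStart_NS (k v : List Char) (h : pvNoStart k v) : pvNS k v := by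
  intro off hoff
  have h' := List.all_eq_true.mp h off (List.mem_range.mpr hoff)
  obtain ⟨h1', h2'⟩ := (Bool.and_eq_true _ _).mp h'
  exact ⟨by simpa using h1', by simpa using h2'⟩

theorem pvNS_drop (k v : List Char) (m : Nat) (h : pvNS k v) : pvNS (k.drop m) v := by
  intro off hoff
  rw [List.drop_drop]
  exact h (m + off) (by simp only [List.length_drop] at hoff; omega)

theorem noStart_block (k k' : List Char) (h : pvNS k k') :
    ∀ off < k.length, ∀ w : List Char, k'.isPrefixOf (k.drop off ++ w) = false := by
  intro off hoff w
  obtain ⟨h1, h2⟩ := h off hoff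
  by_contra hb
  have hb' : k' <+: (k.drop off ++ w) := by
    rw [← List.isPrefixOf_iff_prefix]
    exact Bool.of_not_eq_false hb
  have hp2 : (k.drop off) <+: (k.drop off ++ w) := List.prefix_append _ _
  rcases Nat.le_total k'.length (k.drop off).length with hle | hle
  · have := List.prefix_of_prefix_length_le hb' hp2 hle
    rw [← List.isPrefixOf_iff_prefix] at this
    simp [this] at h1
  · have := List.prefix_of_prefix_length_le hp2 hb' hle
    rw [← List.isPrefixOf_iff_prefix] at this
    simp [this] at h2

-- a block whose every suffix starts no occurrence passes through a whole pass list
theorem fold_block (ps : List (List Char × List Char)) (a : List Char)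
    (hk : ∀ p ∈ ps, p.1 ≠ [])
    (hblk : ∀ p ∈ ps, ∀ off < a.length, ∀ w : List Char, p.1.isPrefixOf (a.drop off ++ w) = false) :
    ∀ X, foldRep ps (a ++ X) = a ++ foldRep ps X := by
  induction ps with
  | nil => intro X; rfl
  | cons p L ih =>
    intro X
    rw [foldRep_cons, repc_block p.1 p.2 a X
          (fun off hoff => hblk p (by simp) off hoff X),
        ih (fun q hq => hk q (by simp [hq])) (fun q hq => hblk q (by simp [hq])), foldRep_cons]

-- prefix reflection: a word that cannot start inside v nor align with its boundary and
-- that prefixes the output of a pass already prefixed its input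
theorem pref_reflect (k v : List Char) (hk : k ≠ []) :
    ∀ (w u : List Char), u ≠ [] → pvNS u v →
      u.isPrefixOf (repc k v w) = true → u.isPrefixOf w = true := by
  intro w
  induction w with
  | nil =>
    intro u hu _ hpre
    rw [repc_nil] at hpre
    have : u = [] := by simpa [List.isPrefixOf_iff_prefix] using hpre
    exact absurd this hu
  | cons c t ih =>
    intro u hu hNS hpre
    obtain ⟨uh, u', rfl⟩ : ∃ uh u', u = uh :: u' := by
      cases u with
      | nil => exact absurd rfl hu
      | cons a b => exact ⟨a, b, rfl⟩
    by_cases hp : k.isPrefixOf (c :: t) = true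
    · rw [repc_front k v _ hk hp] at hpre
      have h0 := hNS 0 (by simp)
      have hpre' : (uh :: u') <+: v ++ repc k v (List.drop k.length (c :: t)) :=
        List.isPrefixOf_iff_prefix.mp hpre
      rcases Nat.le_total (uh :: u').length v.length with hle | hle
      · have := List.prefix_of_prefix_length_le hpre' (List.prefix_append _ _) hle
        rw [← List.isPrefixOf_iff_prefix] at this
        simp only [List.drop_zero] at h0
        rw [h0.2] at this
        exact absurd this (by simp)
      · have := List.prefix_of_prefix_length_le (List.prefix_append _ _) hpre' hle
        rw [← List.isPrefixOf_iff_prefix] at this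
        simp only [List.drop_zero] at h0
        rw [h0.1] at this
        exact absurd this (by simp)
    · have hpb : k.isPrefixOf (c :: t) = false := Bool.eq_false_iff.mpr hp
      rw [repc_cons_not k v c t hpb] at hpre
      have hpre' := List.cons_prefix_cons.mp (List.isPrefixOf_iff_prefix.mp hpre)
      cases u' with
      | nil =>
        rw [List.isPrefixOf_iff_prefix, hpre'.1]
        simp [List.cons_prefix_cons]
      | cons x xs =>
        have hNS' : pvNS (x :: xs) v := pvNS_drop (uh :: x :: xs) v 1 hNS
        have hrec := ih (x :: xs) (by simp) hNS'
          (List.isPrefixOf_iff_prefix.mpr hpre'.2)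
        rw [List.isPrefixOf_iff_prefix, List.cons_prefix_cons]
        exact ⟨hpre'.1, List.isPrefixOf_iff_prefix.mp hrec⟩

theorem pref_reflect_fold (L : List (List Char × List Char))
    (hL : ∀ p ∈ L, p.1 ≠ []) :
    ∀ (w u : List Char), u ≠ [] → (∀ p ∈ L, pvNS u p.2) →
      u.isPrefixOf (foldRep L w) = true → u.isPrefixOf w = true := by
  induction L with
  | nil => intro w u _ _ h; exact h
  | cons p L ih =>
    intro w u hu hNS hpre
    exact pref_reflect p.1 p.2 (hL p (by simp)) w u hu (hNS p (by simp))
      (ih (fun q hq => hL q (by simp [hq])) (repc p.1 p.2 w) u hu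
        (fun q hq => hNS q (by simp [hq])) hpre)

-- LemB: if no key matches at the front, every pass keeps the first character
theorem fold_cons_no (ps : List (List Char × List Char))
    (Hk : ∀ p ∈ ps, p.1 ≠ [])
    (Hcross : ∀ p ∈ ps, ∀ q ∈ ps, pvNS p.1 q.2 ∧ pvNS p.2 q.1)
    (c : Char) (t : List Char)
    (hnf : ∀ p ∈ ps, p.1.isPrefixOf (c :: t) = false) :
    foldRep ps (c :: t) = c :: foldRep ps t := by
  suffices h : ∀ L : List (List Char × List Char), (∀ p ∈ L, p ∈ ps) →
      foldRep L (c :: t) = c :: foldRep L t from h ps (fun _ h => h)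
  intro L
  induction L using List.reverseRecOn with
  | nil => intro _; rfl
  | append_singleton L p ih =>
    intro hsub
    have hLsub : ∀ q ∈ L, q ∈ ps := fun q hq => hsub q (by simp [hq])
    have hp : p ∈ ps := hsub p (by simp)
    rw [foldRep_concat, foldRep_concat, ih hLsub]
    apply repc_cons_not
    by_contra hb
    have hb' : p.1 <+: (c :: foldRep L t) := by
      rw [← List.isPrefixOf_iff_prefix]
      exact Bool.of_not_eq_false hb
    obtain ⟨ph, p', hp1⟩ : ∃ ph p', p.1 = ph :: p' := by
      cases hp1 : p.1 with
      | nil => exact absurd hp1 (Hk p hp)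
      | cons a b => exact ⟨a, b, rfl⟩
    rw [hp1] at hb'
    have hcp := List.cons_prefix_cons.mp hb'
    cases p' with
    | nil =>
      have hT : p.1.isPrefixOf (c :: t) = true := by
        rw [hp1, List.isPrefixOf_iff_prefix, hcp.1]
        simp [List.cons_prefix_cons]
      rw [hnf p hp] at hT
      exact Bool.false_ne_true hT
    | cons x xs =>
      have hNSx : ∀ q ∈ L, pvNS (x :: xs) q.2 := by
        intro q hq
        have := pvNS_drop p.1 q.2 1 ((Hcross p hp q (hLsub q hq)).1)
        rwa [hp1] at this
      have hrefl := pref_reflect_fold L (fun q hq => Hk q (hLsub q hq))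
        t (x :: xs) (by simp) hNSx (List.isPrefixOf_iff_prefix.mpr hcp.2)
      have hT : p.1.isPrefixOf (c :: t) = true := by
        rw [hp1, List.isPrefixOf_iff_prefix, List.cons_prefix_cons]
        exact ⟨hcp.1, List.isPrefixOf_iff_prefix.mp hrefl⟩
      rw [hnf p hp] at hT
      exact Bool.false_ne_true hT

-- LemA: if the key of some pair matches at the front, the whole loop consumes it
theorem fold_front (L1 L2 : List (List Char × List Char)) (p : List Char × List Char)
    (Hk : ∀ q ∈ L1 ++ p :: L2, q.1 ≠ [])
    (Hcross : ∀ q ∈ L1 ++ p :: L2, ∀ r ∈ L1 ++ p :: L2, pvNS q.1 r.2 ∧ pvNS q.2 r.1)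
    (Ho : (L1 ++ p :: L2).Pairwise (fun a b => pvNoStart a.1 b.1 ∧ pvNoStart b.1 a.1))
    (s : List Char) (hpre : p.1.isPrefixOf s = true) :
    foldRep (L1 ++ p :: L2) s = p.2 ++ foldRep (L1 ++ p :: L2) (s.drop p.1.length) := by
  obtain ⟨w, hw⟩ := List.isPrefixOf_iff_prefix.mp hpre
  have hdrop : s.drop p.1.length = w := by rw [← hw]; exact List.drop_left ..
  rw [hdrop, ← hw]
  have hppt : p ∈ L1 ++ p :: L2 := by simp
  have hrel := (List.pairwise_append.mp Ho).2.2
  have hblk1 : ∀ q ∈ L1, ∀ off < p.1.length, ∀ w : List Char,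
      q.1.isPrefixOf (p.1.drop off ++ w) = false := by
    intro q hq
    exact noStart_block p.1 q.1 (pvNoStart_NS _ _ ((hrel q hq p (by simp)).2))
  have hstep1 : ∀ X, foldRep L1 (p.1 ++ X) = p.1 ++ foldRep L1 X :=
    fold_block L1 p.1 (fun q hq => Hk q (by simp [hq])) hblk1
  have hblk3 : ∀ q ∈ L2, ∀ off < p.2.length, ∀ w : List Char,
      q.1.isPrefixOf (p.2.drop off ++ w) = false := by
    intro q hq
    exact noStart_block p.2 q.1 ((Hcross p hppt q (by simp [hq])).2)
  have hstep3 : ∀ X, foldRep L2 (p.2 ++ X) = p.2 ++ foldRep L2 X :=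
    fold_block L2 p.2 (fun q hq => Hk q (by simp [hq])) hblk3
  have hmid : ∀ Y : List Char, repc p.1 p.2 (p.1 ++ Y) = p.2 ++ repc p.1 p.2 Y := by
    intro Y
    rw [repc_front p.1 p.2 (p.1 ++ Y) (Hk p hppt)
          (List.isPrefixOf_iff_prefix.mpr (List.prefix_append _ _))]
    rw [List.drop_left ..]
  calc foldRep (L1 ++ p :: L2) (p.1 ++ w)
      = foldRep L2 (repc p.1 p.2 (foldRep L1 (p.1 ++ w))) := by
        simp [foldRep, List.foldl_append]
    _ = foldRep L2 (repc p.1 p.2 (p.1 ++ foldRep L1 w)) := by rw [hstep1]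
    _ = foldRep L2 (p.2 ++ repc p.1 p.2 (foldRep L1 w)) := by rw [hmid]
    _ = p.2 ++ foldRep L2 (repc p.1 p.2 (foldRep L1 w)) := by rw [hstep3]
    _ = p.2 ++ foldRep (L1 ++ p :: L2) w := by simp [foldRep, List.foldl_append]

theorem scanB_stable (ps : List (List Char × List Char)) (Hk : ∀ p ∈ ps, p.1 ≠ []) :
    ∀ (f g : Nat) (s : List Char), s.length ≤ f → s.length ≤ g →
      scanB ps f s = scanB ps g s := by
  intro f
  induction f with
  | zero =>
    intro g s hf _
    have : s = [] := List.eq_nil_of_length_eq_zero (Nat.le_zero.mp hf)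
    subst this
    cases g <;> simp [scanB]
  | succ f ih =>
    intro g s hf hg
    cases s with
    | nil => cases g <;> simp [scanB]
    | cons c t =>
      cases g with
      | zero => simp at hg
      | succ g' =>
        simp only [scanB]
        cases hfind : ps.find? (fun p => p.1.isPrefixOf (c :: t)) with
        | none =>
          dsimp only
          have h1 : t.length ≤ f := by simp only [List.length_cons] at hf; omega
          have h2 : t.length ≤ g' := by simp only [List.length_cons] at hg; omega
          rw [ih g' t h1 h2]
        | some p =>
          dsimp only
          have hmem := List.mem_of_find?_eq_some hfind
          have hpos : 0 < p.1.length := List.length_pos_iff.mpr (Hk p hmem)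
          have h1 : (List.drop p.1.length (c :: t)).length ≤ f := by
            simp only [List.length_drop, List.length_cons] at *
            omega
          have h2 : (List.drop p.1.length (c :: t)).length ≤ g' := by
            simp only [List.length_drop, List.length_cons] at *
            omega
          rw [ih g' _ h1 h2]

-- the heart: A's sequential passes equal B's single scan on non-interfering pairs
theorem fold_eq_scan (ps : List (List Char × List Char))
    (Hk : ∀ p ∈ ps, p.1 ≠ [])
    (Hcross : ∀ p ∈ ps, ∀ q ∈ ps, pvNS p.1 q.2 ∧ pvNS p.2 q.1)
    (Ho : ps.Pairwise (fun a b => pvNoStart a.1 b.1 ∧ pvNoStart b.1 a.1)) :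
    ∀ (n : Nat) (s : List Char), s.length ≤ n → foldRep ps s = scanB ps s.length s := by
  intro n
  induction n with
  | zero =>
    intro s hs
    have : s = [] := List.eq_nil_of_length_eq_zero (Nat.le_zero.mp hs)
    subst this
    rw [foldRep_nils]; rfl
  | succ n ih =>
    intro s hs
    cases s with
    | nil =>
      rw [foldRep_nils]; rfl
    | cons c t =>
      simp only [List.length_cons, scanB]
      cases hfind : ps.find? (fun p => p.1.isPrefixOf (c :: t)) with
      | none =>
        dsimp only
        have hnf : ∀ p ∈ ps, p.1.isPrefixOf (c :: t) = false := fun p hp =>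
          Bool.eq_false_iff.mpr (List.find?_eq_none.mp hfind p hp)
        rw [fold_cons_no ps Hk Hcross c t hnf]
        have hlen : t.length ≤ n := by simp only [List.length_cons] at hs; omega
        rw [ih t hlen]
      | some p =>
        have hmem := List.mem_of_find?_eq_some hfind
        have hpred : p.1.isPrefixOf (c :: t) = true := by
          have := List.find?_some hfind
          simpa using this
        obtain ⟨L1, L2, hps⟩ := List.append_of_mem hmem
        have hpos : 0 < p.1.length := List.length_pos_iff.mpr (Hk p hmem)
        have hff : foldRep ps (c :: t) = p.2 ++ foldRep ps (List.drop p.1.length (c :: t)) := by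
          rw [hps]
          exact fold_front L1 L2 p (hps ▸ Hk) (hps ▸ Hcross) (hps ▸ Ho) (c :: t) hpred
        have hdlen : (List.drop p.1.length (c :: t)).length ≤ n := by
          simp only [List.length_cons] at hs
          simp only [List.length_drop, List.length_cons]
          omega
        have hdlen' : (List.drop p.1.length (c :: t)).length ≤ t.length := by
          simp only [List.length_drop, List.length_cons]
          omega
        rw [hff, ih _ hdlen]
        congr 1
        exact scanB_stable ps Hk _ t.length _ (le_refl _) hdlen'

-- A's string-level loop equals the list-level multi-pass foldRep
theorem strfold (items : List (String × String)) (hk : ∀ p ∈ items, p.1 ≠ "") :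
    ∀ f : String, items.foldl (fun f p => PySem.Str.replace f p.1 p.2) f
      = String.ofList (foldRep (items.map (fun p => (p.1.toList, p.2.toList))) f.toList) := by
  induction items with
  | nil => intro f; simp [foldRep_nil_pairs]
  | cons p L ih =>
    intro f
    simp only [List.foldl_cons, List.map_cons, foldRep_cons]
    rw [ih (fun q hq => hk q (by simp [hq])) (PySem.Str.replace f p.1 p.2)]
    congr 2
    rw [PySem.Str.toList_replace]
    exact replace_eq_repc f.toList p.1.toList p.2.toList
      (fun hnil => hk p (by simp) (String.toList_eq_nil_iff.mp hnil))

-- both ports loop over the same active item list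
theorem portA_items (formula : String) (ns : List (String × String)) (reverse : Bool) :
    replaceNominals formula ns reverse
      = (pvActiveItems ns reverse).foldl (fun f p => PySem.Str.replace f p.1 p.2) formula := by
  cases reverse <;> rfl

theorem portB_items (formula : String) (ns : List (String × String)) (reverse : Bool) :
    replaceNominals_alt formula ns reverse
      = String.ofList (scanB (((pvActiveItems ns reverse).filter
            (fun p => !p.1.toList.isEmpty)).map (fun p => (p.1.toList, p.2.toList)))
          formula.toList.length formula.toList) := by
  cases reverse <;> rfl

-- when a key occurs nowhere in the text, its pass is a no-op
theorem repc_noocc (k v s : List Char) (h : ¬ k <:+: s) : repc k v s = s := by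
  induction s with
  | nil => exact repc_nil k v
  | cons c t ih =>
    have hnp : k.isPrefixOf (c :: t) = false := by
      by_contra hb
      exact h (List.isPrefixOf_iff_prefix.mp (Bool.of_not_eq_false hb)).isInfix
    rw [repc_cons_not k v c t hnp, ih (fun hi => h (List.infix_cons hi))]

theorem foldRep_noocc (L : List (List Char × List Char)) (s : List Char)
    (h : ∀ p ∈ L, ¬ p.1 <:+: s) : foldRep L s = s := by
  induction L with
  | nil => rfl
  | cons p L ih =>
    rw [foldRep_cons, repc_noocc p.1 p.2 s (h p (by simp))]
    exact ih (fun q hq => h q (by simp [hq]))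

theorem scanB_noocc (ps : List (List Char × List Char)) :
    ∀ s : List Char, (∀ p ∈ ps, ¬ p.1 <:+: s) → scanB ps s.length s = s := by
  intro s
  induction s with
  | nil => intro _; rfl
  | cons c t ih =>
    intro h
    simp only [List.length_cons, scanB]
    have hfind : ps.find? (fun p => p.1.isPrefixOf (c :: t)) = none := by
      apply List.find?_eq_none.mpr
      intro p hp hb
      exact h p hp (List.isPrefixOf_iff_prefix.mp (by simpa using hb)).isInfix
    rw [hfind]
    exact congrArg (c :: ·) (ih (fun p hp hi => h p hp (List.infix_cons hi)))

-- a single pass over one key is exactly the one-key scan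
theorem repc_eq_scan_single (k v : List Char) (hk : k ≠ []) :
    ∀ (n : Nat) (s : List Char), s.length ≤ n → repc k v s = scanB [(k, v)] s.length s := by
  intro n
  induction n with
  | zero =>
    intro s hs
    have : s = [] := List.eq_nil_of_length_eq_zero (Nat.le_zero.mp hs)
    subst this
    rfl
  | succ n ih =>
    intro s hs
    cases s with
    | nil => rfl
    | cons c t =>
      simp only [List.length_cons, scanB]
      cases hp : k.isPrefixOf (c :: t) with
      | true =>
        rw [List.find?_cons_of_pos (by simpa using hp)]
        dsimp only
        rw [repc_front k v _ hk hp]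
        have hpos : 0 < k.length := List.length_pos_iff.mpr hk
        have hdl : (List.drop k.length (c :: t)).length ≤ n := by
          simp only [List.length_cons] at hs
          simp only [List.length_drop, List.length_cons]
          omega
        have hdl' : (List.drop k.length (c :: t)).length ≤ t.length := by
          simp only [List.length_drop, List.length_cons]
          omega
        rw [ih _ hdl]
        congr 1
        exact scanB_stable [(k, v)] (by simpa using hk) _ t.length _ (le_refl _) hdl'
      | false =>
        rw [List.find?_cons_of_neg (by simp [hp])]
        dsimp only [List.find?]
        rw [repc_cons_not k v c t hp]
        have hlen : t.length ≤ n := by simp only [List.length_cons] at hs; omega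
        rw [ih t hlen]

-- a ("", "") entry is a no-op pass for A
theorem strrep_noop (f : String) : PySem.Str.replace f "" "" = f := by
  apply String.toList_inj.mp
  rw [PySem.Str.toList_replace]
  simp [PySem.Chars.replace]

theorem fold_eff (ns : List (String × String)) (reverse : Bool) :
    ∀ f : String,
      (pvActiveItems ns reverse).foldl (fun f p => PySem.Str.replace f p.1 p.2) f
        = (pvEffItems ns reverse).foldl (fun f p => PySem.Str.replace f p.1 p.2) f := by
  show ∀ f : String, _
  unfold pvEffItems
  generalize pvActiveItems ns reverse = items
  induction items with
  | nil => intro f; rfl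
  | cons p L ih =>
    intro f
    by_cases hp : (p.1 == "" && p.2 == "") = true
    · obtain ⟨h1, h2⟩ := (Bool.and_eq_true _ _).mp hp
      have h1' : p.1 = "" := by simpa using h1
      have h2' : p.2 = "" := by simpa using h2
      rw [List.filter_cons_of_neg (by simp [hp])]
      simp only [List.foldl_cons, h1', h2', strrep_noop]
      exact ih f
    · rw [List.filter_cons_of_pos (by simp only [Bool.not_eq_true']; exact Bool.eq_false_iff.mpr hp)]
      simp only [List.foldl_cons]
      exact ih (PySem.Str.replace f p.1 p.2)

-- under nonempty effective keys, B's key filter keeps exactly the effective items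
theorem filter_eff_eq (ns : List (String × String)) (reverse : Bool)
    (h : ∀ p ∈ pvEffItems ns reverse, p.1 ≠ "") :
    (pvActiveItems ns reverse).filter (fun p => !p.1.toList.isEmpty)
      = pvEffItems ns reverse := by
  unfold pvEffItems
  unfold pvEffItems at h
  apply List.filter_congr
  intro p hp
  by_cases hk : p.1 = ""
  · have hv : p.2 = "" := by
      by_contra hv
      exact h p (List.mem_filter.mpr ⟨hp, by simp [hk, hv]⟩) hk
    rw [hk, hv]
    rfl
  · have hkl : p.1.toList ≠ [] := fun hn => hk (String.toList_eq_nil_iff.mp hn)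
    have hl : p.1.toList.isEmpty = false := by simpa [List.isEmpty_iff] using hkl
    have hr : (p.1 == "") = false := by simpa using hk
    simp [hl, hr]

-- ===== VERDICT (by name: the statement is the Claim_ definition above) =====
theorem replaceNominals_spec : Claim_equal_replaceNominals := by
  intro formula ns reverse _hdom hpre
  unfold Spec_replaceNominals
  rw [portA_items, portB_items, fold_eff ns reverse formula]
  have hkeys : ∀ p ∈ pvEffItems ns reverse, p.1 ≠ "" := by
    rcases hpre with ⟨hne, _, _⟩ | hnoocc | ⟨_, hkne1⟩
    · exact hne
    · intro p hp heq
      have h1 := hnoocc p hp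
      rw [String.toList_eq_nil_iff.mpr heq, PySem.Chars.isIn_nil] at h1
      exact absurd h1 (by simp)
    · exact hkne1
  rw [filter_eff_eq ns reverse hkeys]
  rcases hpre with ⟨hne, hcross, hpair⟩ | hnoocc | ⟨hlen, hkne1⟩
  case inr.inl =>
    rw [strfold (pvEffItems ns reverse) hkeys formula]
    rw [foldRep_noocc _ _ (by
      intro p hp
      obtain ⟨q, hq, rfl⟩ := List.mem_map.mp hp
      exact (PySem.Chars.isIn_eq_false_iff q.1.toList formula.toList).mp (hnoocc q hq))]
    rw [scanB_noocc _ _ (by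
      intro p hp
      obtain ⟨q, hq, rfl⟩ := List.mem_map.mp hp
      exact (PySem.Chars.isIn_eq_false_iff q.1.toList formula.toList).mp (hnoocc q hq))]
  case inr.inr =>
    obtain ⟨p, hitems⟩ : ∃ p, pvEffItems ns reverse = [p] := by
      cases hit : pvEffItems ns reverse with
      | nil => rw [hit] at hlen; simp at hlen
      | cons p L =>
        cases L with
        | nil => exact ⟨p, rfl⟩
        | cons q M => rw [hit] at hlen; simp at hlen
    have hpk : p.1 ≠ "" := hkne1 p (by rw [hitems]; simp)
    have hpkl : p.1.toList ≠ [] := fun hnil => hpk (String.toList_eq_nil_iff.mp hnil)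
    rw [strfold (pvEffItems ns reverse) hkne1 formula, hitems]
    simp only [List.map_cons, List.map_nil]
    congr 1
    show foldRep [(p.1.toList, p.2.toList)] formula.toList = _
    rw [foldRep_cons, foldRep_nil_pairs]
    exact repc_eq_scan_single p.1.toList p.2.toList hpkl formula.toList.length
      formula.toList (le_refl _)
  case inl =>
  set ps := (pvEffItems ns reverse).map (fun p => (p.1.toList, p.2.toList)) with hps
  have Hk : ∀ p ∈ ps, p.1 ≠ [] := by
    intro p hp
    obtain ⟨q, hq, rfl⟩ := List.mem_map.mp hp
    exact fun hnil => hne q hq (String.toList_eq_nil_iff.mp hnil)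
  have Hcross : ∀ p ∈ ps, ∀ q ∈ ps, pvNS p.1 q.2 ∧ pvNS p.2 q.1 := by
    intro p hp q hq
    obtain ⟨p', hp', rfl⟩ := List.mem_map.mp hp
    obtain ⟨q', hq', rfl⟩ := List.mem_map.mp hq
    exact ⟨pvNoStart_NS _ _ (hcross p' hp' q' hq').1,
           pvNoStart_NS _ _ (hcross p' hp' q' hq').2⟩
  have Ho : ps.Pairwise (fun a b => pvNoStart a.1 b.1 ∧ pvNoStart b.1 a.1) := by
    rw [hps, List.pairwise_map]
    exact hpair
  rw [strfold (pvEffItems ns reverse) hne formula]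
  rw [fold_eq_scan ps Hk Hcross Ho formula.toList.length formula.toList (le_refl _)]
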